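-- pv_equiv track=rewrite | github.com/tomiokamada/regio | algo1/cardseq.py | calc
-- ===== SOURCE A (Python) =====
-- def calc(lst):
--     result = 0
--     for k in lst:
--         if k > 9:
--             result = result * 100 + k
--         else:
--             result = result * 10 + k
--     return result
-- ===== SOURCE B (Python) =====
-- def calc(lst):
--     result = 0
--     place = 1
--     for k in reversed(lst):
--         result += k * place
--         place *= 100 if k > 9 else 10
--     return result
-- ===== Notes on version B (the rewrite author's own statement) =====
-- stated objective: alternative
-- what changed: Replaces the forward Horner accumulation (result = result*base + k) by a reverse traversal maintaining a place-value multiplier and summing k*place.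
import Mathlib
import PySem

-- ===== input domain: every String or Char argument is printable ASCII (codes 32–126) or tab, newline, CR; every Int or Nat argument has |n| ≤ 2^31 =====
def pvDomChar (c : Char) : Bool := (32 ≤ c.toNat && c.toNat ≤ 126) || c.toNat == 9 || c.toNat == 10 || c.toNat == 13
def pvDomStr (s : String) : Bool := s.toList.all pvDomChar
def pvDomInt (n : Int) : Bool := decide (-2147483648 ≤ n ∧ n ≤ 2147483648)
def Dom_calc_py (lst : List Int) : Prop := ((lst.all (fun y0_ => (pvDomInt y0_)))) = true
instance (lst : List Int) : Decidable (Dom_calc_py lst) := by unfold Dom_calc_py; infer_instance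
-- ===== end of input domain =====

-- B replaces A's forward Horner accumulation by a reverse traversal with a place-value
-- multiplier (objective: alternative, same cost).

-- ===== PORT A =====
-- Port of A: forward fold, result = result*(100 or 10) + k
def calc_py (lst : List Int) : Int :=
  lst.foldl (fun result k => if k > 9 then result * 100 + k else result * 10 + k) 0

-- ===== PORT B =====
-- Port of B: reverse traversal with a place-value multiplier in the state
def calc_py_alt (lst : List Int) : Int :=
  (lst.reverse.foldl
    (fun s k => (s.1 + k * s.2, s.2 * (if k > 9 then 100 else 10)))
    ((0 : Int), (1 : Int))).1

-- ===== PRECONDITION & SPEC =====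
def Spec_calc_py (lst : List Int) (out : Int) : Prop := out = calc_py_alt lst
instance (lst : List Int) (out : Int) : Decidable (Spec_calc_py lst out) := by unfold Spec_calc_py; infer_instance

-- ===== CLAIM (what is proved, stated in full; the proofs are below) =====
def Claim_equal_calc_py : Prop := ∀ (lst : List Int), Dom_calc_py lst → Spec_calc_py lst (calc_py lst)

-- ===== LEMMAS AND PROOFS =====

-- ===== VERDICT (by name: the statement is the Claim_ definition above) =====
theorem altState (ys : List Int) (r p : Int) :
    ys.foldl (fun s k => (s.1 + k * s.2, s.2 * (if k > 9 then 100 else 10))) (r, p)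
      = (r + p * (ys.foldl (fun s k => (s.1 + k * s.2, s.2 * (if k > 9 then 100 else 10))) ((0 : Int), (1 : Int))).1,
         p * (ys.foldl (fun s k => (s.1 + k * s.2, s.2 * (if k > 9 then 100 else 10))) ((0 : Int), (1 : Int))).2) := by
  induction ys generalizing r p with
  | nil => simp
  | cons y ys ih =>
    simp only [List.foldl_cons]
    rw [ih, ih (0 + y * 1)]
    simp only [Prod.mk.injEq]
    constructor <;> ring

theorem alt_concat (xs : List Int) (k : Int) :
    calc_py_alt (xs ++ [k]) = k + (if k > 9 then (100:Int) else 10) * calc_py_alt xs := by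
  unfold calc_py_alt
  rw [List.reverse_append]
  simp only [List.reverse_cons, List.reverse_nil, List.nil_append, List.singleton_append,
    List.foldl_cons]
  rw [altState]
  simp

theorem calc_eq_alt (lst : List Int) : calc_py lst = calc_py_alt lst := by
  induction lst using List.reverseRecOn with
  | nil => rfl
  | append_singleton xs k ih =>
    rw [alt_concat]
    unfold calc_py
    rw [List.foldl_append]
    simp only [List.foldl_cons, List.foldl_nil]
    rw [show (List.foldl (fun result k => if k > 9 then result * 100 + k else result * 10 + k) 0 xs) = calc_py xs from rfl, ih]
    split <;> ring

theorem calc_py_spec : Claim_equal_calc_py := by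
  intro lst _
  exact calc_eq_alt lst
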